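-- pv_equiv track=rewrite | github.com/dedolence/advent-of-code | 2024/day03/part2-failure.py | reduce_instructions
-- ===== SOURCE A (Python) =====
-- def reduce_instructions(input: str, output: str = "", flag: bool = True):
--     if input == "":
--         return output
--
--     if input.startswith("do()"):
--         flag = True
--     if input.startswith("don't()"):
--         flag = False
--
--     if flag:
--         output += input[0]
--
--     return reduce_instructions(input[1:], output, flag)
-- ===== SOURCE B (Python) =====
-- def reduce_instructions(input: str, output: str = "", flag: bool = True):
--     # Iterative marker-jumping: find the next toggle marker and copy/skip whole
--     # intervals, instead of testing startswith at every character.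
--     while input:
--         if flag:
--             i = input.find("don't()")
--             if i == -1:
--                 return output + input
--             output += input[:i]
--             input = input[i + 7:]
--             flag = False
--         else:
--             i = input.find("do()")
--             if i == -1:
--                 return output
--             output += input[i:i + 4]
--             input = input[i + 4:]
--             flag = True
--     return output
-- ===== Notes on version B (the rewrite author's own statement) =====
-- stated objective: faster
-- what changed: Replaced A's per-character recursion (which tests startswith at every position and rebuilds the string each call) by an iterative loop that finds the next toggle marker with str.find and copies/skips whole intervals by slicing.
import Mathlib
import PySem

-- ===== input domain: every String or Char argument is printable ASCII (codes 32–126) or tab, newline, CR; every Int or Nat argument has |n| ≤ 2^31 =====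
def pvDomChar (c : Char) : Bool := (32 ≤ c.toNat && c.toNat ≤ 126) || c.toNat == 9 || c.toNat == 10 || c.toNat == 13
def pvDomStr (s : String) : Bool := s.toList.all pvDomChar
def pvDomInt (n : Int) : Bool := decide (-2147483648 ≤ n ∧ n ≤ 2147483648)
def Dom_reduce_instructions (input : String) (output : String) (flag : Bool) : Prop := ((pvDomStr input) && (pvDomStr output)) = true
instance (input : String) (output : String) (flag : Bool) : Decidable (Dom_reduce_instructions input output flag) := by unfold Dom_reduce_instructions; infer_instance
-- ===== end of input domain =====

-- B replaces A's per-character startswith recursion by iterative marker-jumping: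
-- find the next toggle marker and copy/skip whole intervals (an alternative algorithm).

-- ===== PORT A =====
-- the token lists are "do()".toList and "don't()".toList written out
def pvDoTok : List Char := ['d', 'o', '(', ')']
def pvDontTok : List Char := ['d', 'o', 'n', '\'', 't', '(', ')']

-- A's recursion, on the code-point lists (input[0] = head, input[1:] = tail)
def pvReduceA (inp out : List Char) (flag : Bool) : List Char :=
  match inp with
  | [] => out
  | c :: rest =>
    let flag1 := if PySem.Chars.startswith inp pvDoTok then true else flag
    let flag2 := if PySem.Chars.startswith inp pvDontTok then false else flag1
    let out2 := if flag2 then out ++ [c] else out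
    pvReduceA rest out2 flag2

def reduce_instructions (input : String) (output : String) (flag : Bool) : String :=
  String.ofList (pvReduceA input.toList output.toList flag)

-- ===== PORT B =====
-- B's while-loop as recursion on the shrinking input (each iteration drops ≥ 4 chars);
-- Python's local 'i = input.find(...)' is written inline
def pvReduceB (inp out : List Char) (flag : Bool) : List Char :=
  if hne : inp = [] then out
  else if flag then
    if hi : PySem.Chars.find inp pvDontTok = -1 then out ++ inp
    else
      -- output += input[:i]; input = input[i+7:]; flag = False
      pvReduceB (PySem.List.slice inp (some (PySem.Chars.find inp pvDontTok + 7)) none)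
                (out ++ PySem.List.slice inp none (some (PySem.Chars.find inp pvDontTok))) false
  else
    if hi : PySem.Chars.find inp pvDoTok = -1 then out
    else
      -- output += input[i:i+4]; input = input[i+4:]; flag = True
      pvReduceB (PySem.List.slice inp (some (PySem.Chars.find inp pvDoTok + 4)) none)
                (out ++ PySem.List.slice inp (some (PySem.Chars.find inp pvDoTok))
                                            (some (PySem.Chars.find inp pvDoTok + 4))) true
termination_by inp.length
decreasing_by
  · have h0 : (0:Int) ≤ PySem.Chars.find inp pvDontTok := by
      have := PySem.Chars.neg_one_le_find inp pvDontTok; omega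
    rw [PySem.List.slice_from inp (by omega : (0:Int) ≤ PySem.Chars.find inp pvDontTok + 7)]
    have hl : 0 < inp.length := List.length_pos_iff.mpr hne
    simp only [List.length_drop]
    omega
  · have h0 : (0:Int) ≤ PySem.Chars.find inp pvDoTok := by
      have := PySem.Chars.neg_one_le_find inp pvDoTok; omega
    rw [PySem.List.slice_from inp (by omega : (0:Int) ≤ PySem.Chars.find inp pvDoTok + 4)]
    have hl : 0 < inp.length := List.length_pos_iff.mpr hne
    simp only [List.length_drop]
    omega

def reduce_instructions_alt (input : String) (output : String) (flag : Bool) : String :=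
  String.ofList (pvReduceB input.toList output.toList flag)

-- ===== PRECONDITION & SPEC =====
def Spec_reduce_instructions (input : String) (output : String) (flag : Bool) (out : String) : Prop := out = reduce_instructions_alt input output flag
instance (input : String) (output : String) (flag : Bool) (out : String) : Decidable (Spec_reduce_instructions input output flag out) := by unfold Spec_reduce_instructions; infer_instance

-- ===== CLAIM (what is proved, stated in full; the proofs are below) =====
def Claim_equal_reduce_instructions : Prop := ∀ (input : String) (output : String) (flag : Bool), Dom_reduce_instructions input output flag → Spec_reduce_instructions input output flag (reduce_instructions input output flag)

-- ===== LEMMAS AND PROOFS =====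

-- while no "don't()" starts anywhere, A in the on-state copies everything
theorem pvA_true_skip (inp : List Char) (out : List Char)
    (h : ∀ j, ¬ pvDontTok <+: inp.drop j) :
    pvReduceA inp out true = out ++ inp := by
  induction inp generalizing out with
  | nil => simp [pvReduceA]
  | cons c rest ih =>
    have h0 : PySem.Chars.startswith (c :: rest) pvDontTok = false := by
      rw [Bool.eq_false_iff]
      intro hs
      exact h 0 (by simpa using (PySem.Chars.startswith_iff _ _).mp hs)
    have ihr := ih (out ++ [c]) (fun j => by simpa using h (j + 1))
    cases hdo : PySem.Chars.startswith (c :: rest) pvDoTok <;>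
      simp [pvReduceA, h0, hdo, ihr]

-- while no "do()" starts anywhere, A in the off-state drops everything
theorem pvA_false_skip (inp : List Char) (out : List Char)
    (h : ∀ j, ¬ pvDoTok <+: inp.drop j) :
    pvReduceA inp out false = out := by
  induction inp generalizing out with
  | nil => simp [pvReduceA]
  | cons c rest ih =>
    have h0 : PySem.Chars.startswith (c :: rest) pvDoTok = false := by
      rw [Bool.eq_false_iff]
      intro hs
      exact h 0 (by simpa using (PySem.Chars.startswith_iff _ _).mp hs)
    have ihr := ih out (fun j => by simpa using h (j + 1))
    cases hdont : PySem.Chars.startswith (c :: rest) pvDontTok <;>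
      simp [pvReduceA, h0, hdont, ihr]

-- up to the first "don't()", A in the on-state copies characters verbatim
theorem pvA_true_walk (i : ℕ) (inp : List Char) (out : List Char)
    (h : ∀ j < i, ¬ pvDontTok <+: inp.drop j) :
    pvReduceA inp out true = pvReduceA (inp.drop i) (out ++ inp.take i) true := by
  induction i generalizing inp out with
  | zero => simp
  | succ n ih =>
    match inp with
    | [] => simp
    | c :: rest =>
      have h0 : PySem.Chars.startswith (c :: rest) pvDontTok = false := by
        rw [Bool.eq_false_iff]
        intro hs
        exact h 0 (Nat.succ_pos n) (by simpa using (PySem.Chars.startswith_iff _ _).mp hs)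
      have ihr := ih rest (out ++ [c]) (fun j hj => by simpa using h (j + 1) (by omega))
      cases hdo : PySem.Chars.startswith (c :: rest) pvDoTok <;>
        simp [pvReduceA, h0, hdo, ihr]

-- up to the first "do()", A in the off-state drops characters
theorem pvA_false_walk (i : ℕ) (inp : List Char) (out : List Char)
    (h : ∀ j < i, ¬ pvDoTok <+: inp.drop j) :
    pvReduceA inp out false = pvReduceA (inp.drop i) out false := by
  induction i generalizing inp with
  | zero => simp
  | succ n ih =>
    match inp with
    | [] => simp
    | c :: rest =>
      have h0 : PySem.Chars.startswith (c :: rest) pvDoTok = false := by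
        rw [Bool.eq_false_iff]
        intro hs
        exact h 0 (Nat.succ_pos n) (by simpa using (PySem.Chars.startswith_iff _ _).mp hs)
      have ihr := ih rest (fun j hj => by simpa using h (j + 1) (by omega))
      cases hdont : PySem.Chars.startswith (c :: rest) pvDontTok <;>
        simp [pvReduceA, h0, hdont, ihr]

-- crossing a "don't()" marker: 7 characters are consumed, nothing emitted, state off
theorem pvA_marker_dont (t : List Char) (out : List Char) (f : Bool) :
    pvReduceA ('d'::'o'::'n'::'\''::'t'::'('::')'::t) out f = pvReduceA t out false := by
  simp [pvReduceA, PySem.Chars.startswith, List.isPrefixOf, pvDoTok, pvDontTok]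

-- crossing a "do()" marker: its 4 characters are emitted, state on
theorem pvA_marker_do (t : List Char) (out : List Char) (f : Bool) :
    pvReduceA ('d'::'o'::'('::')'::t) out f = pvReduceA t (out ++ ['d','o','(',')']) true := by
  simp [pvReduceA, PySem.Chars.startswith, List.isPrefixOf, pvDoTok, pvDontTok]

-- a prefix of some drop means the substring occurs, so find ≠ -1
theorem pvFind_of_prefix_drop (s sub : List Char) (j : ℕ) (h : sub <+: s.drop j) :
    PySem.Chars.find s sub ≠ -1 := by
  rw [PySem.Chars.find_ne_neg_one_iff]
  exact (PySem.Chars.isIn_iff_infix sub s).mp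
    ((PySem.Chars.exists_prefix_drop_iff_isIn sub s).mp ⟨j, h⟩)

-- the core agreement, by strong induction (fuel = length bound)
theorem pvAB_agree (n : ℕ) : ∀ (inp out : List Char) (flag : Bool), inp.length ≤ n →
    pvReduceA inp out flag = pvReduceB inp out flag := by
  induction n with
  | zero =>
    intro inp out flag hlen
    have hnil : inp = [] := List.length_eq_zero_iff.mp (Nat.le_zero.mp hlen)
    subst hnil
    rw [pvReduceB]
    simp [pvReduceA]
  | succ n ih =>
    intro inp out flag hlen
    by_cases hne : inp = []
    · subst hne
      rw [pvReduceB]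
      simp [pvReduceA]
    · cases flag with
      | true =>
        rw [pvReduceB, dif_neg hne, if_pos rfl]
        by_cases hi : PySem.Chars.find inp pvDontTok = -1
        · rw [dif_pos hi]
          exact pvA_true_skip inp out
            (fun j hpre => pvFind_of_prefix_drop inp pvDontTok j hpre hi)
        · rw [dif_neg hi]
          have h0 : (0:Int) ≤ PySem.Chars.find inp pvDontTok := by
            have := PySem.Chars.neg_one_le_find inp pvDontTok; omega
          obtain ⟨hpre, hmin⟩ := PySem.Chars.find_spec (s := inp) (sub := pvDontTok) h0
          obtain ⟨t, ht⟩ := hpre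
          set k : ℕ := (PySem.Chars.find inp pvDontTok).toNat with hk
          have hshape : inp.drop k = 'd'::'o'::'n'::'\''::'t'::'('::')'::t := by
            simpa [pvDontTok] using ht.symm
          have hdrop7 : inp.drop (k + 7) = t := by
            have h77 : List.drop 7 (List.drop k inp) = List.drop (k + 7) inp :=
              List.drop_drop
            rw [← h77, hshape]
            rfl
          rw [pvA_true_walk k inp out hmin, hshape, pvA_marker_dont]
          rw [PySem.List.slice_from inp
                (by omega : (0:Int) ≤ PySem.Chars.find inp pvDontTok + 7),
              PySem.List.slice_to inp h0]
          have htn : (PySem.Chars.find inp pvDontTok + 7).toNat = k + 7 := by omega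
          rw [htn, ← hk, hdrop7]
          apply ih t (out ++ inp.take k) false
          have hl : (pvDontTok ++ t).length = (List.drop k inp).length := by rw [ht]
          simp [pvDontTok] at hl
          omega
      | false =>
        rw [pvReduceB, dif_neg hne, if_neg (by simp)]
        by_cases hi : PySem.Chars.find inp pvDoTok = -1
        · rw [dif_pos hi]
          exact pvA_false_skip inp out
            (fun j hpre => pvFind_of_prefix_drop inp pvDoTok j hpre hi)
        · rw [dif_neg hi]
          have h0 : (0:Int) ≤ PySem.Chars.find inp pvDoTok := by
            have := PySem.Chars.neg_one_le_find inp pvDoTok; omega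
          obtain ⟨hpre, hmin⟩ := PySem.Chars.find_spec (s := inp) (sub := pvDoTok) h0
          obtain ⟨t, ht⟩ := hpre
          set k : ℕ := (PySem.Chars.find inp pvDoTok).toNat with hk
          have hshape : inp.drop k = 'd'::'o'::'('::')'::t := by
            simpa [pvDoTok] using ht.symm
          have hdrop4 : inp.drop (k + 4) = t := by
            have h44 : List.drop 4 (List.drop k inp) = List.drop (k + 4) inp :=
              List.drop_drop
            rw [← h44, hshape]
            rfl
          rw [pvA_false_walk k inp out hmin, hshape, pvA_marker_do]
          rw [PySem.List.slice_from inp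
                (by omega : (0:Int) ≤ PySem.Chars.find inp pvDoTok + 4),
              PySem.List.slice_toNat inp h0 (by omega)]
          have htn : (PySem.Chars.find inp pvDoTok + 4).toNat = k + 4 := by omega
          rw [htn, ← hk, hdrop4]
          have hslice : List.take (k + 4 - k) (List.drop k inp) = ['d','o','(',')'] := by
            rw [hshape, Nat.add_sub_cancel_left]
            rfl
          rw [hslice]
          apply ih t (out ++ ['d','o','(',')']) true
          have hl : (pvDoTok ++ t).length = (List.drop k inp).length := by rw [ht]
          simp [pvDoTok] at hl
          omega

-- ===== VERDICT (by name: the statement is the Claim_ definition above) =====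
theorem reduce_instructions_spec : Claim_equal_reduce_instructions := by
  intro input output flag _
  unfold Spec_reduce_instructions reduce_instructions reduce_instructions_alt
  exact congrArg String.ofList
    (pvAB_agree input.toList.length input.toList output.toList flag le_rfl)
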